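-- pv_equiv track=rewrite | github.com/rexrex9/gnn | dgl_version/dataloader4kg.py | setForTopKevaluation
-- ===== SOURCE A (Python) =====
-- def setForTopKevaluation(testSet):
--     all_testItems = set()
--     user_items=dict()
--     for u,v,r in testSet:
--         all_testItems.add(v)
--         if u not in user_items:
--             user_items[u]={
--                 'pos':set(),
--                 'neg':set()
--             }
--         if r=='1':
--             user_items[u]['pos'].add(v)
--         else:
--             user_items[u]['neg'].add(v)
--     return all_testItems,user_items
-- ===== SOURCE B (Python) =====
-- def setForTopKevaluation(testSet):
--     all_testItems = {v for u, v, r in testSet}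
--     users = dict.fromkeys(u for u, v, r in testSet)
--     user_items = {
--         u: {'pos': {v for u2, v, r in testSet if u2 == u and r == '1'},
--             'neg': {v for u2, v, r in testSet if u2 == u and r != '1'}}
--         for u in users
--     }
--     return all_testItems, user_items
-- ===== Notes on version B (the rewrite author's own statement) =====
-- stated objective: alternative
-- what changed: Replaces A's single mutating pass (per-row 'seen this user yet?' dict check plus in-place set.add) with a declarative decomposition: a set comprehension for all items, dict.fromkeys for the user order, and per-user comprehensions that rescan testSet to collect pos/neg.
import Mathlib
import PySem

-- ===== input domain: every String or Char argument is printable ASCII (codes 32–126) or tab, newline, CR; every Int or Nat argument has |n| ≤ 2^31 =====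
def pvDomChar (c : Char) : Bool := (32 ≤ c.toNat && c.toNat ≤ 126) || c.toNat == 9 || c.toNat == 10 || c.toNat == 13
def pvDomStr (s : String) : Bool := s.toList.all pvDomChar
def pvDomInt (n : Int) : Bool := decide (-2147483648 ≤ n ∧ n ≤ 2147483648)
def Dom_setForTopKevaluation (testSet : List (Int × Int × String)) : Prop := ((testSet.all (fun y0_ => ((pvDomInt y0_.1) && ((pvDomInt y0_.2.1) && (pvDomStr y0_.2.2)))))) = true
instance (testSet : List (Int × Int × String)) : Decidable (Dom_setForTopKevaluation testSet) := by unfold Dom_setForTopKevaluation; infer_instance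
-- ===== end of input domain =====

-- B replaces A's single mutating pass (seen-user check + in-place set adds) with a declarative
-- decomposition: dedup the users once, then per-user filters build the pos/neg sets; alternative, not faster.


-- ===== PORT A =====
-- the fresh {'pos': set(), 'neg': set()} value
def pvFreshUD : PySem.Dict String (PySem.Set Int) :=
  PySem.Dict.ofList [("pos", PySem.Set.empty), ("neg", PySem.Set.empty)]

-- the body of A's for-loop, acting on the state (all_testItems, user_items)
def pvStep (st : PySem.Set Int × PySem.Dict Int (PySem.Dict String (PySem.Set Int)))
    (row : Int × Int × String) :
    PySem.Set Int × PySem.Dict Int (PySem.Dict String (PySem.Set Int)) :=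
  let all := PySem.Set.add st.1 row.2.1
  let ui := if st.2.contains row.1 then st.2 else st.2.insert row.1 pvFreshUD
  let ui := if row.2.2 == "1" then
      ui.modify row.1 PySem.Dict.empty
        (fun d => d.modify "pos" PySem.Set.empty (fun s => PySem.Set.add s row.2.1))
    else
      ui.modify row.1 PySem.Dict.empty
        (fun d => d.modify "neg" PySem.Set.empty (fun s => PySem.Set.add s row.2.1))
  (all, ui)

def setForTopKevaluation (testSet : List (Int × Int × String)) :
    List Int × (List (Int × List (String × List Int))) :=
  let st := testSet.foldl pvStep (PySem.Set.empty, PySem.Dict.empty)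
  (st.1, st.2.items.map (fun kv => (kv.1, kv.2.items)))

-- ===== PORT B =====
def setForTopKevaluation_alt (testSet : List (Int × Int × String)) :
    List Int × (List (Int × List (String × List Int))) :=
  let all_testItems := PySem.Set.ofList (testSet.map (fun row => row.2.1))
  let users := PySem.List.dedup (testSet.map (fun row => row.1))
  let user_items := users.map (fun u =>
    (u, [("pos", PySem.Set.ofList
            ((testSet.filter (fun row => row.1 == u && row.2.2 == "1")).map (fun row => row.2.1))),
         ("neg", PySem.Set.ofList
            ((testSet.filter (fun row => row.1 == u && !(row.2.2 == "1"))).map (fun row => row.2.1)))]))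
  (all_testItems, user_items)

-- ===== PRECONDITION & SPEC =====
def Spec_setForTopKevaluation (testSet : List (Int × Int × String)) (out : List Int × (List (Int × List (String × List Int)))) : Prop := out = setForTopKevaluation_alt testSet
instance (testSet : List (Int × Int × String)) (out : List Int × (List (Int × List (String × List Int)))) : Decidable (Spec_setForTopKevaluation testSet out) := by unfold Spec_setForTopKevaluation; infer_instance

-- ===== CLAIM (what is proved, stated in full; the proofs are below) =====
def Claim_equal_setForTopKevaluation : Prop := ∀ (testSet : List (Int × Int × String)), Dom_setForTopKevaluation testSet → Spec_setForTopKevaluation testSet (setForTopKevaluation testSet)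

-- ===== LEMMAS AND PROOFS =====

-- the dict component of A's loop body (the state components evolve independently)
def pvStepD (d : PySem.Dict Int (PySem.Dict String (PySem.Set Int)))
    (row : Int × Int × String) : PySem.Dict Int (PySem.Dict String (PySem.Set Int)) :=
  (pvStep (PySem.Set.empty, d) row).2

theorem pvStep_eq (st : PySem.Set Int × PySem.Dict Int (PySem.Dict String (PySem.Set Int)))
    (row : Int × Int × String) :
    pvStep st row = (PySem.Set.add st.1 row.2.1, pvStepD st.2 row) := rfl

theorem pvFoldl_split (l : List (Int × Int × String))
    (a : PySem.Set Int) (d : PySem.Dict Int (PySem.Dict String (PySem.Set Int))) :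
    l.foldl pvStep (a, d) =
      (l.foldl (fun s row => PySem.Set.add s row.2.1) a, l.foldl pvStepD d) := by
  induction l generalizing a d with
  | nil => rfl
  | cons x l ih => simp only [List.foldl_cons, pvStep_eq]; exact ih _ _

-- A's repeated user_items[u]['pos'/'neg'].add(v) over a list of rows, from a given inner dict
def pvExt (dv : PySem.Dict String (PySem.Set Int)) (rows : List (Int × Int × String)) :
    PySem.Dict String (PySem.Set Int) :=
  rows.foldl (fun dv row =>
    if row.2.2 == "1" then dv.modify "pos" PySem.Set.empty (fun s => PySem.Set.add s row.2.1)
    else dv.modify "neg" PySem.Set.empty (fun s => PySem.Set.add s row.2.1)) dv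

theorem pvExt_literal (rows : List (Int × Int × String)) (p n : PySem.Set Int) :
    pvExt (PySem.Dict.ofList [("pos", p), ("neg", n)]) rows =
      PySem.Dict.ofList
        [("pos", PySem.Set.update p ((rows.filter (fun row => row.2.2 == "1")).map (fun row => row.2.1))),
         ("neg", PySem.Set.update n ((rows.filter (fun row => !(row.2.2 == "1"))).map (fun row => row.2.1)))] := by
  induction rows generalizing p n with
  | nil => rfl
  | cons x l ih =>
    by_cases h : x.2.2 = "1"
    · simp only [pvExt, List.foldl_cons, List.filter_cons, h] at *
      simpa using ih (PySem.Set.add p x.2.1) n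
    · have hb : (x.2.2 == "1") = false := by simpa using h
      simp only [pvExt, List.foldl_cons, List.filter_cons, hb] at *
      simpa [hb] using ih p (PySem.Set.add n x.2.1)

theorem pvGet?_foldl (l : List (Int × Int × String))
    (d : PySem.Dict Int (PySem.Dict String (PySem.Set Int))) (u : Int) :
    (l.foldl pvStepD d).get? u =
      match d.get? u with
      | some dv => some (pvExt dv (l.filter (fun row => row.1 == u)))
      | none =>
          if u ∈ l.map (fun row => row.1) then
            some (pvExt pvFreshUD (l.filter (fun row => row.1 == u)))
          else none := by
  induction l generalizing d with
  | nil => cases h : d.get? u <;> simp [h, pvExt]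
  | cons x l ih =>
    obtain ⟨xu, xv, xr⟩ := x
    simp only [List.foldl_cons]
    rw [ih]
    have hmod : ∀ (d' : PySem.Dict Int (PySem.Dict String (PySem.Set Int))) d0 f,
        (d'.modify xu d0 f).get? xu = some (f (d'.getD xu d0)) := by
      intro d' d0 f; exact PySem.Dict.get?_insert_self d' xu _
    by_cases hu : xu = u
    · subst hu
      cases h : d.get? xu with
      | some dv =>
        have hc : d.contains xu = true := by
          rw [PySem.Dict.contains_eq_isSome_get?, h]; rfl
        have hg : d.getD xu PySem.Dict.empty = dv := PySem.Dict.getD_of_get?_eq_some d _ h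
        have hstep : (pvStepD d (xu, xv, xr)).get? xu = some (pvExt dv [(xu, xv, xr)]) := by
          simp only [pvStepD, pvStep, hc, if_true]
          by_cases hr : xr = "1" <;> simp [hr, hmod, hg, pvExt]
        rw [hstep]
        simp [pvExt]
      | none =>
        have hc : d.contains xu = false := by
          rw [PySem.Dict.contains_eq_isSome_get?, h]; rfl
        have hg : (d.insert xu pvFreshUD).getD xu PySem.Dict.empty = pvFreshUD := by
          rw [PySem.Dict.getD_eq_get?_getD, PySem.Dict.get?_insert_self]; rfl
        have hstep : (pvStepD d (xu, xv, xr)).get? xu = some (pvExt pvFreshUD [(xu, xv, xr)]) := by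
          simp only [pvStepD, pvStep, hc, Bool.false_eq_true, if_false]
          by_cases hr : xr = "1" <;> simp [hr, hmod, hg, pvExt]
        rw [hstep]
        simp [pvExt]
    · have hne : u ≠ xu := fun h => hu h.symm
      have hmodne : ∀ (d' : PySem.Dict Int (PySem.Dict String (PySem.Set Int))) d0 f,
          (d'.modify xu d0 f).get? u = d'.get? u := by
        intro d' d0 f; exact PySem.Dict.get?_insert_of_ne d' _ hne
      have hstep : (pvStepD d (xu, xv, xr)).get? u = d.get? u := by
        simp only [pvStepD, pvStep]
        by_cases hc : d.contains xu <;> by_cases hr : xr = "1" <;>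
          simp [hc, hr, hmodne, PySem.Dict.get?_insert_of_ne _ _ hne]
      rw [hstep]
      have hf : ((⟨xu, xv, xr⟩ :: l : List (Int × Int × String)).filter (fun row => row.1 == u)) =
          l.filter (fun row => row.1 == u) := by
        simp [hu]
      have hmm : (u ∈ xu :: l.map (fun row => row.1)) ↔ (u ∈ l.map (fun row => row.1)) := by
        simp [hne]
      cases h : d.get? u with
      | some dv => simp [hf]
      | none => simp only [List.map_cons, hf]; exact (if_congr hmm rfl rfl).symm

theorem pvKeys_foldl (l : List (Int × Int × String))
    (d : PySem.Dict Int (PySem.Dict String (PySem.Set Int))) :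
    (l.foldl pvStepD d).keys = PySem.Set.update d.keys (l.map (fun row => row.1)) := by
  induction l generalizing d with
  | nil => rfl
  | cons x l ih =>
    have hstep : (pvStepD d x).keys = PySem.Set.add d.keys x.1 := by
      by_cases hc : d.contains x.1
      · have hmem : x.1 ∈ d.keys := (PySem.Dict.contains_iff_mem_keys d x.1).mp hc
        by_cases hr : x.2.2 = "1" <;>
          simp [pvStepD, pvStep, hc, hr, PySem.Dict.keys_insert_of_contains _ _ hc,
            PySem.Set.add, hmem]
      · have hcf : d.contains x.1 = false := by simpa using hc
        have hmem : x.1 ∉ d.keys := fun hm =>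
          hc ((PySem.Dict.contains_iff_mem_keys d x.1).mpr hm)
        by_cases hr : x.2.2 = "1" <;>
          simp [pvStepD, pvStep, hcf, hr, PySem.Dict.insert_insert_self,
            PySem.Dict.keys_insert_of_not_contains _ _ hcf, PySem.Set.add, hmem]
    simp only [List.foldl_cons, List.map_cons, ih, hstep]
    rfl

theorem pvSnd_eq (l : List (Int × Int × String)) :
    (l.foldl pvStepD PySem.Dict.empty).items.map (fun kv => (kv.1, kv.2.items)) =
      (PySem.List.dedup (l.map (fun row => row.1))).map (fun u =>
        (u, [("pos", PySem.Set.ofList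
                ((l.filter (fun row => row.1 == u && row.2.2 == "1")).map (fun row => row.2.1))),
             ("neg", PySem.Set.ofList
                ((l.filter (fun row => row.1 == u && !(row.2.2 == "1"))).map (fun row => row.2.1)))])) := by
  set D := l.foldl pvStepD PySem.Dict.empty with hD
  have hkeys : D.keys = PySem.Set.ofList (l.map (fun row => row.1)) := by
    rw [hD, pvKeys_foldl]; rfl
  have hnd : D.keys.Nodup := by rw [hkeys]; exact PySem.Set.nodup_ofList _
  rw [PySem.Dict.items_eq_map_keys D hnd pvFreshUD, List.map_map, hkeys,
    ← PySem.List.dedup_eq_ofList]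
  apply List.map_congr_left
  intro u hu
  have humem : u ∈ l.map (fun row => row.1) := (PySem.List.mem_dedup _ _).1 hu
  have hget : D.get? u = some (pvExt pvFreshUD (l.filter (fun row => row.1 == u))) := by
    rw [hD, pvGet?_foldl]
    simp [PySem.Dict.get?_empty, humem]
  have hgetD : D.getD u pvFreshUD = pvExt pvFreshUD (l.filter (fun row => row.1 == u)) :=
    PySem.Dict.getD_of_get?_eq_some D _ hget
  have hfilt1 : (l.filter (fun row => row.1 == u)).filter (fun row => row.2.2 == "1") =
      l.filter (fun row => row.1 == u && row.2.2 == "1") := by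
    rw [List.filter_filter]
    exact List.filter_congr (fun x _ => by rw [Bool.and_comm])
  have hfilt2 : (l.filter (fun row => row.1 == u)).filter (fun row => !(row.2.2 == "1")) =
      l.filter (fun row => row.1 == u && !(row.2.2 == "1")) := by
    rw [List.filter_filter]
    exact List.filter_congr (fun x _ => by rw [Bool.and_comm])
  simp only [Function.comp_apply]
  rw [hgetD, show pvFreshUD = PySem.Dict.ofList [("pos", PySem.Set.empty), ("neg", PySem.Set.empty)] from rfl,
    pvExt_literal, hfilt1, hfilt2]
  rfl

-- ===== VERDICT (by name: the statement is the Claim_ definition above) =====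
theorem setForTopKevaluation_spec : Claim_equal_setForTopKevaluation := by
  intro testSet _
  show setForTopKevaluation testSet = setForTopKevaluation_alt testSet
  have h1 : testSet.foldl (fun s row => PySem.Set.add s row.2.1) PySem.Set.empty
      = PySem.Set.ofList (testSet.map (fun row => row.2.1)) := by
    rw [PySem.Set.ofList_eq_foldl, List.foldl_map]; rfl
  simp only [setForTopKevaluation, setForTopKevaluation_alt, pvFoldl_split, h1, pvSnd_eq]
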